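-- pv_equiv track=rewrite | github.com/GoToBoy/glean | backend/apps/worker/glean_worker/main.py | _group_refresh_schedule_hours
-- ===== SOURCE A (Python) =====
-- def _group_refresh_schedule_hours(interval_minutes: int) -> dict[int, set[int]]:
--     """Return one day of cron hour buckets grouped by minute."""
--     if interval_minutes <= 0:
--         raise ValueError("feed_refresh_interval_minutes must be positive")
--     if 1440 % interval_minutes != 0:
--         raise ValueError("feed_refresh_interval_minutes must evenly divide 1440")
--
--     grouped_hours: dict[int, set[int]] = {}
--     for minute_of_day in range(0, 1440, interval_minutes):
--         hour, minute = divmod(minute_of_day, 60)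
--         grouped_hours.setdefault(minute, set()).add(hour)
--     return grouped_hours
-- ===== SOURCE B (Python) =====
-- def _group_refresh_schedule_hours(interval_minutes: int) -> dict[int, set[int]]:
--     """Return one day of cron hour buckets grouped by minute."""
--     if interval_minutes <= 0:
--         raise ValueError("feed_refresh_interval_minutes must be positive")
--     if 1440 % interval_minutes != 0:
--         raise ValueError("feed_refresh_interval_minutes must evenly divide 1440")
--
--     # Closed form: ticks sharing a minute are exactly lcm(interval, 60) apart,
--     # so each minute bucket is an arithmetic range of hours; the distinct
--     # minutes are the first min(1440 // interval, 60 // gcd) tick minutes.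
--     g, r = interval_minutes, 60
--     while r:
--         g, r = r, g % r
--     hour_step = interval_minutes // g
--     n_minutes = min(1440 // interval_minutes, 60 // g)
--     return {
--         (k * interval_minutes) % 60: set(range((k * interval_minutes) // 60, 24, hour_step))
--         for k in range(n_minutes)
--     }
-- ===== Notes on version B (the rewrite author's own statement) =====
-- stated objective: alternative
-- what changed: Replaces the 1440/interval-step accumulation loop with setdefault by a closed form: a gcd computation gives the hour step (interval//gcd) and the number of distinct minutes, and each bucket is emitted directly as one dict comprehension of arithmetic ranges.
import Mathlib
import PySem

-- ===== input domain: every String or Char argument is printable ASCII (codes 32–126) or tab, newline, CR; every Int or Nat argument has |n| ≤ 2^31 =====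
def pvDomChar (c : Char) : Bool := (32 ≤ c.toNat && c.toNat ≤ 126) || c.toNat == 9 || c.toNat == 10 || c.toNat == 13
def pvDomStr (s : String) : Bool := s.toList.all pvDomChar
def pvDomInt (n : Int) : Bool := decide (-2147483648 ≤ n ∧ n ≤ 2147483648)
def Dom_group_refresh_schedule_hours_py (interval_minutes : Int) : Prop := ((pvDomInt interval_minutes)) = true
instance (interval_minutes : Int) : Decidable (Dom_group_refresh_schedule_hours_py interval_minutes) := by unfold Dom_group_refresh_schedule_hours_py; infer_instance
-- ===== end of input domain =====

-- ===== PORT A =====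
-- One honest line: B replaces A's per-tick accumulation loop by a gcd-based closed
-- form emitting each minute bucket as an arithmetic range of hours (objective: alternative).
def group_refresh_schedule_hours_py (interval_minutes : Int) : List (Int × List Int) :=
  if interval_minutes ≤ 0 then []  -- Python: raise ValueError (excluded by Pre_)
  else if PySem.Int.mod 1440 interval_minutes ≠ 0 then []  -- Python: raise ValueError (excluded by Pre_)
  else
    ((PySem.List.pyRange 0 1440 interval_minutes).foldl
      (fun (d : PySem.Dict Int (PySem.Set Int)) minute_of_day =>
        -- hour, minute = divmod(minute_of_day, 60); grouped_hours.setdefault(minute, set()).add(hour)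
        let hour := PySem.Int.floordiv minute_of_day 60
        let minute := PySem.Int.mod minute_of_day 60
        d.insert minute (PySem.Set.add (d.getD minute PySem.Set.empty) hour))
      PySem.Dict.empty).items

-- ===== PORT B =====
-- 'g, r = interval_minutes, 60; while r: g, r = r, g % r' from Source B.
-- Structural fuel recursion so the kernel can reduce it; fuel r.natAbs + 1 always
-- suffices because |g % r| < |r| (Python mod is bounded by the divisor).
def pyGcdAux : Nat → Int → Int → Int
  | 0, g, _ => g
  | fuel + 1, g, r => if r = 0 then g else pyGcdAux fuel r (PySem.Int.mod g r)

def pyGcdLoop (g r : Int) : Int := pyGcdAux (r.natAbs + 1) g r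

def group_refresh_schedule_hours_py_alt (interval_minutes : Int) : List (Int × List Int) :=
  if interval_minutes ≤ 0 then []  -- Python: raise ValueError (excluded by Pre_)
  else if PySem.Int.mod 1440 interval_minutes ≠ 0 then []  -- Python: raise ValueError (excluded by Pre_)
  else
    let g := pyGcdLoop interval_minutes 60
    let hour_step := PySem.Int.floordiv interval_minutes g
    let n_minutes := min (PySem.Int.floordiv 1440 interval_minutes) (PySem.Int.floordiv 60 g)
    (PySem.List.pyRange 0 n_minutes 1).map (fun k =>
      (PySem.Int.mod (k * interval_minutes) 60,
       PySem.Set.ofList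
         (PySem.List.pyRange (PySem.Int.floordiv (k * interval_minutes) 60) 24 hour_step)))

-- ===== PRECONDITION & SPEC =====
-- Pre_ excludes exactly the inputs on which A raises ValueError: non-positive intervals
-- and intervals that do not evenly divide 1440.
def Pre_group_refresh_schedule_hours_py (interval_minutes : Int) : Prop :=
  0 < interval_minutes ∧ PySem.Int.mod 1440 interval_minutes = 0
instance (interval_minutes : Int) : Decidable (Pre_group_refresh_schedule_hours_py interval_minutes) := by
  unfold Pre_group_refresh_schedule_hours_py; infer_instance

def pvWitness_group_refresh_schedule_hours_py : Int := (45)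

def Spec_group_refresh_schedule_hours_py (interval_minutes : Int) (out : List (Int × List Int)) : Prop := out = group_refresh_schedule_hours_py_alt interval_minutes
instance (interval_minutes : Int) (out : List (Int × List Int)) : Decidable (Spec_group_refresh_schedule_hours_py interval_minutes out) := by unfold Spec_group_refresh_schedule_hours_py; infer_instance

-- ===== CLAIM (what is proved, stated in full; the proofs are below) =====
def Claim_equal_group_refresh_schedule_hours_py : Prop := ∀ (interval_minutes : Int), Dom_group_refresh_schedule_hours_py interval_minutes → Pre_group_refresh_schedule_hours_py interval_minutes → Spec_group_refresh_schedule_hours_py interval_minutes (group_refresh_schedule_hours_py interval_minutes)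

-- ===== LEMMAS AND PROOFS =====

-- Abbreviations used only by the proofs (gcd, step, period, counts, key/value maps).
def mG (I : Nat) : Nat := Nat.gcd I 60
def mS (I : Nat) : Nat := I / mG I
def mP (I : Nat) : Nat := 60 / mG I
def mQ (I : Nat) : Nat := 24 / mS I
def mN (I : Nat) : Nat := 1440 / I
def keyfn (I k : Nat) : Int := ((k * I) % 60 : Nat)
def hvfn (I k : Nat) : Int := ((k * I) / 60 : Nat)

theorem pyMod_natCast60 (m : Nat) : PySem.Int.mod (↑m) 60 = ((m % 60 : Nat) : Int) := by
  simp

theorem pyDiv_natCast60 (m : Nat) : PySem.Int.floordiv (↑m) 60 = ((m / 60 : Nat) : Int) := by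
  simp

theorem pyGcdAux_natCast : ∀ (fuel a b : Nat), b < fuel →
    pyGcdAux fuel (↑a) (↑b) = ↑(Nat.gcd a b) := by
  intro fuel
  induction fuel with
  | zero => intro a b h; omega
  | succ f ih =>
    intro a b hb
    by_cases h0 : b = 0
    · subst h0; simp [pyGcdAux]
    · have hbz : ((b : Nat) : Int) ≠ 0 := by exact_mod_cast h0
      have hblt : 0 < b := Nat.pos_of_ne_zero h0
      rw [show pyGcdAux (f+1) (↑a) (↑b)
            = if ((b : Nat) : Int) = 0 then ((a : Nat) : Int)
              else pyGcdAux f ↑b (PySem.Int.mod ↑a ↑b) from rfl]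
      rw [if_neg hbz, PySem.Int.mod_natCast,
          ih b (a % b) (by have := Nat.mod_lt a hblt; omega)]
      rw [Nat.gcd_comm b (a % b), ← Nat.gcd_rec b a, Nat.gcd_comm b a]

theorem pyGcdLoop_natCast (a : Nat) : pyGcdLoop (↑a) 60 = ↑(Nat.gcd a 60) := by
  unfold pyGcdLoop
  rw [show ((60 : Int).natAbs + 1) = 61 from rfl,
      show (60 : Int) = ((60 : Nat) : Int) from by norm_num,
      pyGcdAux_natCast 61 a 60 (by norm_num)]

theorem mG_pos (I : Nat) : 0 < mG I := Nat.gcd_pos_of_pos_right I (by norm_num)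

theorem mSG (I : Nat) : mS I * mG I = I := Nat.div_mul_cancel (Nat.gcd_dvd_left I 60)

theorem mPG (I : Nat) : mP I * mG I = 60 := Nat.div_mul_cancel (Nat.gcd_dvd_right I 60)

theorem mS_pos (I : Nat) (h0 : 0 < I) : 0 < mS I := by
  have h := mSG I
  rcases Nat.eq_zero_or_pos (mS I) with hz | hp
  · rw [hz, Nat.zero_mul] at h; omega
  · exact hp

theorem mP_pos (I : Nat) : 0 < mP I := by
  have h := mPG I
  rcases Nat.eq_zero_or_pos (mP I) with hz | hp
  · rw [hz, Nat.zero_mul] at h; omega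
  · exact hp

theorem mcop (I : Nat) : Nat.Coprime (mS I) (mP I) :=
  Nat.coprime_div_gcd_div_gcd (mG_pos I)

theorem mS24 (I : Nat) (hdvd : I ∣ 1440) : mS I ∣ 24 := by
  have h1 : mS I * mG I ∣ (24 * mP I) * mG I := by
    rw [mSG, show 24 * mP I * mG I = 24 * (mP I * mG I) from by ring, mPG]
    exact hdvd
  have h2 := (Nat.mul_dvd_mul_iff_right (mG_pos I)).mp h1
  exact (mcop I).dvd_of_dvd_mul_right h2

theorem mQS (I : Nat) (hdvd : I ∣ 1440) : mQ I * mS I = 24 :=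
  Nat.div_mul_cancel (mS24 I hdvd)

theorem mQ_pos (I : Nat) (hdvd : I ∣ 1440) : 0 < mQ I := by
  have h := mQS I hdvd
  rcases Nat.eq_zero_or_pos (mQ I) with hz | hp
  · rw [hz, Nat.zero_mul] at h; omega
  · exact hp

theorem mS_le24 (I : Nat) (hdvd : I ∣ 1440) : mS I ≤ 24 :=
  Nat.le_of_dvd (by norm_num) (mS24 I hdvd)

theorem mNQP (I : Nat) (h0 : 0 < I) (hdvd : I ∣ 1440) : mN I = mQ I * mP I := by
  have hNI : mN I * I = 1440 := Nat.div_mul_cancel hdvd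
  have h1 : mQ I * mP I * I = 1440 := by
    calc mQ I * mP I * I = mQ I * mP I * (mS I * mG I) := by rw [mSG]
      _ = (mQ I * mS I) * (mP I * mG I) := by ring
      _ = 24 * 60 := by rw [mQS I hdvd, mPG]
      _ = 1440 := by norm_num
  exact Nat.eq_of_mul_eq_mul_right h0 (hNI.trans h1.symm)

theorem mPI (I : Nat) : mP I * I = 60 * mS I := by
  calc mP I * I = mP I * (mS I * mG I) := by rw [mSG]
    _ = mS I * (mP I * mG I) := by ring
    _ = mS I * 60 := by rw [mPG]
    _ = 60 * mS I := by ring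

theorem mseq_period (I k j : Nat) : ((k + j * mP I) * I) % 60 = (k * I) % 60 := by
  rw [Nat.add_mul,
      show j * mP I * I = j * (mP I * I) from by ring, mPI,
      show k * I + j * (60 * mS I) = k * I + 60 * (j * mS I) from by ring]
  exact Nat.add_mul_mod_self_left _ _ _

theorem mseq_modP (I t : Nat) : (t * I) % 60 = ((t % mP I) * I) % 60 := by
  conv_lhs => rw [show t = t % mP I + (t / mP I) * mP I from (Nat.mod_add_div' t (mP I)).symm]
  exact mseq_period I (t % mP I) (t / mP I)

theorem mhr_step (I k j : Nat) : ((k + j * mP I) * I) / 60 = (k * I) / 60 + j * mS I := by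
  rw [Nat.add_mul,
      show j * mP I * I = 60 * (j * mS I) from by
        rw [show j * mP I * I = j * (mP I * I) from by ring, mPI]; ring]
  exact Nat.add_mul_div_left _ _ (by norm_num)

theorem mseq_inj (I : Nat) :
    ∀ k1 k2, k1 < mP I → k2 < mP I → (k1 * I) % 60 = (k2 * I) % 60 → k1 = k2 := by
  have main : ∀ k1 k2, k1 ≤ k2 → k2 < mP I → (k1 * I) % 60 = (k2 * I) % 60 → k1 = k2 := by
    intro k1 k2 hle h2 he
    have hd : 60 ∣ (k2 - k1) * I := by
      rw [Nat.sub_mul]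
      exact (Nat.modEq_iff_dvd' (Nat.mul_le_mul_right I hle)).mp he
    have hd2 : mP I * mG I ∣ ((k2 - k1) * mS I) * mG I := by
      rw [mPG, show (k2 - k1) * mS I * mG I = (k2 - k1) * (mS I * mG I) from by ring, mSG]
      exact hd
    have hP : mP I ∣ k2 - k1 :=
      ((mcop I).symm).dvd_of_dvd_mul_right ((Nat.mul_dvd_mul_iff_right (mG_pos I)).mp hd2)
    have := Nat.eq_zero_of_dvd_of_lt hP (by omega)
    omega
  intro k1 k2 h1 h2 he
  rcases le_total k1 k2 with h | h
  · exact main k1 k2 h h2 he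
  · exact (main k2 k1 h h1 he.symm).symm

theorem mhr_lt (I : Nat) (h0 : 0 < I) (k : Nat) (hk : k < mP I) : (k * I) / 60 < mS I := by
  rw [Nat.div_lt_iff_lt_mul (by norm_num : (0:Nat) < 60)]
  calc k * I < mP I * I := (Nat.mul_lt_mul_right h0).mpr hk
    _ = 60 * mS I := mPI I
    _ = mS I * 60 := by ring

theorem range_filter_beq (k : Nat) : ∀ n, k < n →
    (List.range n).filter (fun t => t == k) = [k] := by
  intro n
  induction n with
  | zero => omega
  | succ n ih =>
    intro hk
    rw [List.range_succ, List.filter_append]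
    by_cases h : k = n
    · subst h
      rw [List.filter_eq_nil_iff.mpr ?_, List.nil_append]
      · simp
      · intro a ha
        simp only [List.mem_range] at ha
        simp only [beq_iff_eq]
        omega
    · have hkn : k < n := by omega
      rw [ih hkn]
      have : ((n == k) : Bool) = false := by simp [Ne.symm h]
      simp [List.filter, this]

theorem filter_range_period (I : Nat) (k : Nat) (hk : k < mP I) :
    ∀ q, (List.range (q * mP I)).filter (fun t => (t * I) % 60 == (k * I) % 60)
      = (List.range q).map (fun j => k + j * mP I) := by
  intro q
  induction q with
  | zero => simp
  | succ q ih =>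
    rw [show (q + 1) * mP I = q * mP I + mP I from by ring, List.range_add,
        List.filter_append, ih, List.filter_map]
    have hfc : (List.range (mP I)).filter
        ((fun t => (t * I) % 60 == (k * I) % 60) ∘ (fun x => q * mP I + x))
        = (List.range (mP I)).filter (fun t => t == k) := by
      apply List.filter_congr
      intro t ht
      simp only [List.mem_range] at ht
      simp only [Function.comp]
      rw [Bool.eq_iff_iff]
      simp only [beq_iff_eq]
      constructor
      · intro h
        apply mseq_inj I t k ht hk
        rw [← h, show q * mP I + t = t + q * mP I from by ring, mseq_period]
      · intro h
        subst h
        rw [show q * mP I + t = t + q * mP I from by ring, mseq_period]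
    rw [hfc, range_filter_beq k (mP I) hk, List.range_succ, List.map_append]
    simp [Nat.add_comm]

theorem getD_fold_insert_add (key hv : Nat → Int) :
    ∀ (l : List Nat) (d : PySem.Dict Int (PySem.Set Int)) (c : Int),
    (l.foldl (fun d k =>
        d.insert (key k) (PySem.Set.add (d.getD (key k) PySem.Set.empty) (hv k))) d).getD
        c PySem.Set.empty
      = PySem.Set.update (d.getD c PySem.Set.empty) ((l.filter (fun k => key k == c)).map hv) := by
  intro l
  induction l with
  | nil => intro d c; simp [PySem.Set.update_nil]
  | cons a l ih =>
    intro d c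
    rw [List.foldl_cons, ih]
    by_cases hc : key a = c
    · rw [List.filter_cons_of_pos (by simp [hc]), List.map_cons, PySem.Set.update_cons]
      subst hc
      rw [PySem.Dict.getD_insert_self]
    · rw [List.filter_cons_of_neg (by simp [hc])]
      rw [PySem.Dict.getD_insert_of_ne _ _ _ (fun h => hc h.symm)]

-- ===== VERDICT (by name: the statement is the Claim_ definition above) =====
theorem group_refresh_schedule_hours_py_spec : Claim_equal_group_refresh_schedule_hours_py := by
  intro i _ hpre
  obtain ⟨hpos, hdiv⟩ := hpre
  unfold Spec_group_refresh_schedule_hours_py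
  obtain ⟨I, rfl⟩ : ∃ I : Nat, i = (I : Int) := ⟨i.toNat, (Int.toNat_of_nonneg hpos.le).symm⟩
  have hI0 : 0 < I := by exact_mod_cast hpos
  have hIdvd : I ∣ 1440 := by
    have h : (I : Int) ∣ 1440 := (PySem.Int.mod_eq_zero_iff_dvd 1440 ↑I).mp hdiv
    exact_mod_cast h
  have hne1 : ¬ ((I : Int) ≤ 0) := by exact_mod_cast Nat.not_le.mpr hI0
  have hne2 : ¬ (PySem.Int.mod 1440 ((I : Nat) : Int) ≠ 0) := by simpa using hdiv
  -- the tick list of A, re-indexed over Nat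
  have hcount : PySem.List.pyRange 0 1440 (↑I) = (List.range (mN I)).map (fun k => ((k * I : Nat) : Int)) := by
    rw [PySem.List.pyRange_of_pos 0 1440 (by exact_mod_cast hI0)]
    rw [if_pos (by norm_num : (0:Int) < 1440)]
    have hnum : ((1440 : Int) - 0 + ↑I - 1) = ((1440 + (I - 1) : Nat) : Int) := by
      push_cast [Nat.cast_sub (by omega : 1 ≤ I)]
      omega
    have hdivN : ((1440 + (I - 1)) : Nat) / I = mN I := by
      have hNI : I * mN I = 1440 := by
        rw [Nat.mul_comm]; exact Nat.div_mul_cancel hIdvd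
      rw [show (1440 + (I - 1) : Nat) = I * mN I + (I - 1) from by omega,
          Nat.mul_add_div hI0, Nat.div_eq_of_lt (by omega), Nat.add_zero]
    rw [hnum, ← Int.natCast_div, hdivN, Int.toNat_natCast]
    apply List.map_congr_left
    intro k _
    push_cast
    ring
  -- A reduced to a Nat-indexed fold
  have hA : group_refresh_schedule_hours_py ↑I
      = ((List.range (mN I)).foldl (fun d k =>
          d.insert (keyfn I k)
            (PySem.Set.add (d.getD (keyfn I k) PySem.Set.empty) (hvfn I k)))
          PySem.Dict.empty).items := by
    unfold group_refresh_schedule_hours_py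
    rw [if_neg hne1, if_neg hne2, hcount, List.foldl_map]
    have hfun : (fun (d : PySem.Dict Int (PySem.Set Int)) (k : Nat) =>
        (fun (d : PySem.Dict Int (PySem.Set Int)) (minute_of_day : Int) =>
          d.insert (PySem.Int.mod minute_of_day 60)
            (PySem.Set.add (d.getD (PySem.Int.mod minute_of_day 60) PySem.Set.empty)
              (PySem.Int.floordiv minute_of_day 60))) d ((k * I : Nat) : Int))
        = (fun (d : PySem.Dict Int (PySem.Set Int)) (k : Nat) =>
          d.insert (keyfn I k)
            (PySem.Set.add (d.getD (keyfn I k) PySem.Set.empty) (hvfn I k))) := by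
      funext d k
      simp only [pyMod_natCast60, pyDiv_natCast60, keyfn, hvfn]
    rw [hfun]
  -- keys of that fold
  have hknodup : ((List.range (mP I)).map (keyfn I)).Nodup := by
    apply List.Nodup.map_on ?_ List.nodup_range
    intro x hx y hy hxy
    simp only [List.mem_range] at hx hy
    simp only [keyfn] at hxy
    exact mseq_inj I x y hx hy (by exact_mod_cast hxy)
  have hkeysP : PySem.Set.ofList ((List.range (mN I)).map (keyfn I))
      = (List.range (mP I)).map (keyfn I) := by
    have hq1 : mQ I * mP I = mP I + (mQ I - 1) * mP I := by
      obtain ⟨q, hq'⟩ : ∃ q, mQ I = q + 1 := ⟨mQ I - 1, by have := mQ_pos I hIdvd; omega⟩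
      rw [hq', Nat.add_sub_cancel]
      ring
    rw [mNQP I hI0 hIdvd, hq1, List.range_add, List.map_append, PySem.Set.ofList_append,
        PySem.Set.ofList_eq_self_of_nodup _ hknodup,
        PySem.Set.update_eq_append_filter]
    rw [List.filter_eq_nil_iff.mpr ?_, List.append_nil]
    intro y hy
    rw [PySem.Set.mem_ofList] at hy
    simp only [List.map_map, List.mem_map, List.mem_range] at hy
    obtain ⟨t, ht, rfl⟩ := hy
    simp only [Bool.not_eq_true', Bool.not_eq_false]
    rw [PySem.Set.contains_iff]
    have hkey : keyfn I (mP I + t) = keyfn I ((mP I + t) % mP I) := by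
      simp only [keyfn]
      exact_mod_cast mseq_modP I (mP I + t)
    simp only [Function.comp]
    rw [hkey]
    exact List.mem_map.mpr ⟨(mP I + t) % mP I,
      List.mem_range.mpr (Nat.mod_lt _ (mP_pos I)), rfl⟩
  have hkeysraw : ((List.range (mN I)).foldl (fun d k =>
        d.insert (keyfn I k)
          (PySem.Set.add (d.getD (keyfn I k) PySem.Set.empty) (hvfn I k)))
        PySem.Dict.empty).keys = (List.range (mP I)).map (keyfn I) := by
    rw [PySem.Dict.keys_foldl_insert_key (List.range (mN I)) (keyfn I)
        (fun d k => PySem.Set.add (d.getD (keyfn I k) PySem.Set.empty) (hvfn I k))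
        PySem.Dict.empty,
       PySem.Dict.keys_empty, PySem.Set.update_nil_left, hkeysP]
  have hkeysnodup : ((List.range (mN I)).foldl (fun d k =>
        d.insert (keyfn I k)
          (PySem.Set.add (d.getD (keyfn I k) PySem.Set.empty) (hvfn I k)))
        PySem.Dict.empty).keys.Nodup := by
    rw [hkeysraw]; exact hknodup
  -- per-key value of the fold
  have hval : ∀ k, k < mP I → ((List.range (mN I)).foldl (fun d k =>
        d.insert (keyfn I k)
          (PySem.Set.add (d.getD (keyfn I k) PySem.Set.empty) (hvfn I k)))
        PySem.Dict.empty).getD (keyfn I k) PySem.Set.empty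
      = (List.range (mQ I)).map (fun j => (((k * I) / 60 + j * mS I : Nat) : Int)) := by
    intro k hk
    rw [getD_fold_insert_add (keyfn I) (hvfn I) (List.range (mN I)) PySem.Dict.empty
        (keyfn I k),
       PySem.Dict.getD_empty, PySem.Set.update_empty]
    have hfeq : (List.range (mN I)).filter (fun t => keyfn I t == keyfn I k)
        = (List.range (mN I)).filter (fun t => (t * I) % 60 == (k * I) % 60) := by
      apply List.filter_congr
      intro t _
      rw [Bool.eq_iff_iff]
      simp only [beq_iff_eq, keyfn]
      exact ⟨fun h => by exact_mod_cast h, fun h => by exact_mod_cast h⟩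
    rw [hfeq, mNQP I hI0 hIdvd, filter_range_period I k hk (mQ I), List.map_map]
    have hcomp : (List.range (mQ I)).map (hvfn I ∘ fun j => k + j * mP I)
        = (List.range (mQ I)).map (fun j => (((k * I) / 60 + j * mS I : Nat) : Int)) := by
      apply List.map_congr_left
      intro j _
      simp only [Function.comp, hvfn]
      rw [mhr_step]
    rw [hcomp, PySem.Set.ofList_eq_self_of_nodup]
    apply List.Nodup.map_on ?_ List.nodup_range
    intro x _ y _ hxy
    have h1 : (k * I) / 60 + x * mS I = (k * I) / 60 + y * mS I := by exact_mod_cast hxy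
    have h2 : x * mS I = y * mS I := Nat.add_left_cancel h1
    exact Nat.eq_of_mul_eq_mul_right (mS_pos I hI0) h2
  -- B reduced to the same map
  have hg : pyGcdLoop (↑I) 60 = ((mG I : Nat) : Int) := pyGcdLoop_natCast I
  have hstep : PySem.Int.floordiv ((I : Nat) : Int) ((mG I : Nat) : Int) = ((mS I : Nat) : Int) := by
    rw [PySem.Int.floordiv_natCast]; rfl
  have hNint : PySem.Int.floordiv 1440 ((I : Nat) : Int) = ((mN I : Nat) : Int) := by
    rw [show (1440 : Int) = ((1440 : Nat) : Int) from by norm_num,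
        PySem.Int.floordiv_natCast]
    rfl
  have hPint : PySem.Int.floordiv 60 ((mG I : Nat) : Int) = ((mP I : Nat) : Int) := by
    rw [show (60 : Int) = ((60 : Nat) : Int) from by norm_num,
        PySem.Int.floordiv_natCast]
    rfl
  have hPleN : mP I ≤ mN I := by
    rw [mNQP I hI0 hIdvd]
    exact Nat.le_mul_of_pos_left (mP I) (mQ_pos I hIdvd)
  have hmin : min ((mN I : Nat) : Int) ((mP I : Nat) : Int) = ((mP I : Nat) : Int) :=
    min_eq_right (by exact_mod_cast hPleN)
  -- the per-minute hour bucket of B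
  have hpr : ∀ k, k < mP I →
      PySem.List.pyRange (((k * I) / 60 : Nat) : Int) 24 ((mS I : Nat) : Int)
        = (List.range (mQ I)).map (fun j => (((k * I) / 60 + j * mS I : Nat) : Int)) := by
    intro k hk
    have hS0 := mS_pos I hI0
    have hrlt := mhr_lt I hI0 k hk
    rw [PySem.List.pyRange_of_pos _ _ (by exact_mod_cast hS0)]
    rw [if_pos (by
      exact_mod_cast lt_of_lt_of_le hrlt (mS_le24 I hIdvd))]
    have hnum : ((24 : Int) - (((k * I) / 60 : Nat) : Int) + ((mS I : Nat) : Int) - 1)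
        = ((mS I * mQ I + (mS I - 1 - (k * I) / 60) : Nat) : Int) := by
      have h24 : mS I * mQ I = 24 := by rw [Nat.mul_comm]; exact mQS I hIdvd
      rw [h24]
      omega
    have hdivQ : (mS I * mQ I + (mS I - 1 - (k * I) / 60)) / mS I = mQ I := by
      rw [Nat.mul_add_div hS0, Nat.div_eq_of_lt (by omega), Nat.add_zero]
    rw [hnum, ← Int.natCast_div, hdivQ, Int.toNat_natCast]
    apply List.map_congr_left
    intro j _
    push_cast
    ring
  -- assemble
  rw [hA, PySem.Dict.items_eq_map_keys _ hkeysnodup PySem.Set.empty, hkeysraw, List.map_map]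
  unfold group_refresh_schedule_hours_py_alt
  rw [if_neg hne1, if_neg hne2]
  simp only [hg, hstep, hNint, hPint, hmin, PySem.List.pyRange_zero_natCast, List.map_map]
  apply List.map_congr_left
  intro k hk
  simp only [List.mem_range] at hk
  simp only [Function.comp]
  have hfst : PySem.Int.mod (((k : Nat) : Int) * ((I : Nat) : Int)) 60 = keyfn I k := by
    rw [← Nat.cast_mul, pyMod_natCast60]; rfl
  have hsnd : PySem.Int.floordiv (((k : Nat) : Int) * ((I : Nat) : Int)) 60
      = (((k * I) / 60 : Nat) : Int) := by
    rw [← Nat.cast_mul, pyDiv_natCast60]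
  rw [hfst, hsnd, hpr k hk, hval k hk,
      PySem.Set.ofList_eq_self_of_nodup]
  apply List.Nodup.map_on ?_ List.nodup_range
  intro x _ y _ hxy
  have h1 : (k * I) / 60 + x * mS I = (k * I) / 60 + y * mS I := by exact_mod_cast hxy
  exact Nat.eq_of_mul_eq_mul_right (mS_pos I hI0) (Nat.add_left_cancel h1)
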